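-- pv_equiv track=rewrite | github.com/xtream1101/adventofcode | 2019/python/Day3/final.py | calc_path_distance
-- ===== SOURCE A (Python) =====
-- def calc_path_distance(wire, intersect):
--     path_dist = 0
--     for i, node in enumerate(wire[1:], start=1):
--         prev_node = wire[i - 1]
--         if prev_node[0] == node[0]:
--             # Add vertical distance
--             path_dist += abs(abs(prev_node[1]) - abs(node[1]))
--         else:
--             # Add horizontal distance
--             path_dist += abs(abs(prev_node[0]) - abs(node[0]))
--
--         if node == intersect:
--             # We found the end of the path
--             break
--
--     return path_dist
-- ===== SOURCE B (Python) =====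
-- def calc_path_distance(wire, intersect):
--     # Single full pass: accumulate total length and index each node (from position 1,
--     # first occurrence wins) by the cumulative distance at which it is first reached.
--     # The answer is then a plain dict lookup, defaulting to the whole-wire total.
--     cum = 0
--     first_reached = {}
--     for i in range(1, len(wire)):
--         p, q = wire[i - 1], wire[i]
--         if p[0] == q[0]:
--             cum += abs(abs(p[1]) - abs(q[1]))
--         else:
--             cum += abs(abs(p[0]) - abs(q[0]))
--         first_reached.setdefault(q, cum)
--     return first_reached.get(intersect, cum)
-- ===== Notes on version B (the rewrite author's own statement) =====
-- stated objective: alternative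
-- what changed: Replaced the early-breaking scan by a single full pass that builds a hash index mapping each node (first occurrence) to the cumulative distance at which it is reached, answering with one dict lookup defaulting to the whole-wire total.
import Mathlib
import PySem

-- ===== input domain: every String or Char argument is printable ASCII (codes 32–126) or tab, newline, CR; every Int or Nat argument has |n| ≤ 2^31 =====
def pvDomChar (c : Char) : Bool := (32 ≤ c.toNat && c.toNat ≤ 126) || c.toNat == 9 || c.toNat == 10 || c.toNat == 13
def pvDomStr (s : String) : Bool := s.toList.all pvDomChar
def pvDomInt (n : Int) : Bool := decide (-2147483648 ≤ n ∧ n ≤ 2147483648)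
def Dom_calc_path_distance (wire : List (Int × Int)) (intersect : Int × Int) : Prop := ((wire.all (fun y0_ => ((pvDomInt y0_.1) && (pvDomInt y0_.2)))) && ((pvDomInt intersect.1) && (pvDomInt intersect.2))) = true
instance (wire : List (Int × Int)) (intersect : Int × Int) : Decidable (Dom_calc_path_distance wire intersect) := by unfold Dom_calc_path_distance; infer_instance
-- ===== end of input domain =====

-- B drops A's early-breaking scan for a full pass that hash-indexes each node by the
-- cumulative distance at its first occurrence, answering with one dict lookup; objective: alternative.

-- ===== PORT A =====
def aLoop (intersect : Int × Int) (prev : Int × Int) (rest : List (Int × Int)) (acc : Int) : Int :=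
  match rest with
  | [] => acc
  | node :: tl =>
    let acc' := if prev.1 = node.1 then acc + |(|prev.2| - |node.2|)| else acc + |(|prev.1| - |node.1|)|
    if node = intersect then acc' else aLoop intersect node tl acc'

def calc_path_distance (wire : List (Int × Int)) (intersect : Int × Int) : Int :=
  match wire with
  | [] => 0
  | h :: t => aLoop intersect h t 0

-- ===== PORT B =====
-- full pass over consecutive pairs: carries (cum, first_reached), setdefault keeps first occurrence
def bLoop (prev : Int × Int) (rest : List (Int × Int)) (cum : Int)
    (d : PySem.Dict (Int × Int) Int) : Int × PySem.Dict (Int × Int) Int :=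
  match rest with
  | [] => (cum, d)
  | q :: tl =>
    let cum' := if prev.1 = q.1 then cum + |(|prev.2| - |q.2|)| else cum + |(|prev.1| - |q.1|)|
    bLoop q tl cum' (PySem.Dict.setdefault d q cum')

def calc_path_distance_alt (wire : List (Int × Int)) (intersect : Int × Int) : Int :=
  let st :=
    match wire with
    | [] => ((0 : Int), (PySem.Dict.empty : PySem.Dict (Int × Int) Int))
    | h :: t => bLoop h t 0 PySem.Dict.empty
  PySem.Dict.getD st.2 intersect st.1

-- ===== PRECONDITION & SPEC =====
def Spec_calc_path_distance (wire : List (Int × Int)) (intersect : Int × Int) (out : Int) : Prop := out = calc_path_distance_alt wire intersect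
instance (wire : List (Int × Int)) (intersect : Int × Int) (out : Int) : Decidable (Spec_calc_path_distance wire intersect out) := by unfold Spec_calc_path_distance; infer_instance

-- ===== CLAIM (what is proved, stated in full; the proofs are below) =====
def Claim_equal_calc_path_distance : Prop := ∀ (wire : List (Int × Int)) (intersect : Int × Int), Dom_calc_path_distance wire intersect → Spec_calc_path_distance wire intersect (calc_path_distance wire intersect)

-- ===== LEMMAS AND PROOFS =====

theorem setdefault_eq_insert {κ ν : Type} [BEq κ] [LawfulBEq κ] (d : PySem.Dict κ ν) (k : κ) (v : ν)
    (h : d.get? k = none) : PySem.Dict.setdefault d k v = d.insert k v := by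
  have hc : d.contains k = false := by
    rw [PySem.Dict.contains_eq_isSome_get?, h]; rfl
  apply PySem.Dict.ext
  rw [PySem.Dict.items_insert_of_not_contains _ _ hc]
  simp [PySem.Dict.setdefault, hc]

theorem setdefault_get?_other {κ ν : Type} [BEq κ] [LawfulBEq κ] (d : PySem.Dict κ ν) (k q : κ) (v : ν)
    (hne : k ≠ q) : (PySem.Dict.setdefault d q v).get? k = d.get? k := by
  rcases hq : d.get? q with _ | w
  · rw [setdefault_eq_insert d q v hq, PySem.Dict.get?_insert_of_ne _ _ hne]
  · have hc : d.contains q = true := by rw [PySem.Dict.contains_eq_isSome_get?, hq]; rfl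
    simp [PySem.Dict.setdefault, hc]

-- once intersect is indexed with value v, the rest of the pass never changes it and the lookup yields v
theorem bLoop_found (intersect : Int × Int) (t : List (Int × Int)) :
    ∀ (prev : Int × Int) (acc : Int) (d : PySem.Dict (Int × Int) Int) (v : Int),
    d.get? intersect = some v →
    PySem.Dict.getD (bLoop prev t acc d).2 intersect (bLoop prev t acc d).1 = v := by
  induction t with
  | nil => intro prev acc d v h; simpa [bLoop, PySem.Dict.getD] using congrArg (Option.getD · acc) h
  | cons q tl ih =>
    intro prev acc d v h
    rw [bLoop]
    apply ih
    by_cases hq : intersect = q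
    · subst hq
      have hc : d.contains intersect = true := by rw [PySem.Dict.contains_eq_isSome_get?, h]; rfl
      simp [PySem.Dict.setdefault, hc, h]
    · rw [setdefault_get?_other _ _ _ _ hq]; exact h

-- main invariant: while intersect is not yet indexed, the final lookup equals A's early-breaking loop
theorem bLoop_eq_aLoop (intersect : Int × Int) (t : List (Int × Int)) :
    ∀ (prev : Int × Int) (acc : Int) (d : PySem.Dict (Int × Int) Int),
    d.get? intersect = none →
    PySem.Dict.getD (bLoop prev t acc d).2 intersect (bLoop prev t acc d).1 = aLoop intersect prev t acc := by
  induction t with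
  | nil => intro prev acc d h; simp [bLoop, aLoop, PySem.Dict.getD, h]
  | cons q tl ih =>
    intro prev acc d h
    rw [bLoop, aLoop]
    by_cases hq : q = intersect
    · subst hq
      rw [if_pos rfl]
      exact bLoop_found q tl q _ _ _ (by rw [setdefault_eq_insert d q _ h]; exact PySem.Dict.get?_insert_self _ _ _)
    · rw [if_neg hq]
      apply ih
      rw [setdefault_get?_other _ _ _ _ (fun e => hq e.symm)]; exact h

-- ===== VERDICT (by name: the statement is the Claim_ definition above) =====
theorem calc_path_distance_spec : Claim_equal_calc_path_distance := by
  intro wire intersect _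
  unfold Spec_calc_path_distance calc_path_distance calc_path_distance_alt
  cases wire with
  | nil => simp [PySem.Dict.getD]
  | cons h t =>
    exact (bLoop_eq_aLoop intersect t h 0 PySem.Dict.empty (PySem.Dict.get?_empty _)).symm
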